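-- pv_equiv track=rewrite | github.com/Oujox/aulos | src/mt/scale/processing/accidentals.py | accidentals
-- ===== SOURCE A (Python) =====
-- from itertools import starmap
--
-- def fix_intervals(intervals: tuple[int], scale_intervals: tuple[int]) -> tuple[int]:
--
--     if len(intervals) > len(scale_intervals):
--         pass
--
--     if len(intervals) < len(scale_intervals):
--         _stopper = 0
--         _stepper = 0
--         _intervals = []
--         for i in range(len(scale_intervals)):
--             if len(intervals) <= i - _stopper:
--                 _intervals.append(0)
--                 _stepper = 0
--             elif sum(scale_intervals[i : i + _stepper + 1]) >= intervals[i - _stopper]: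
--                 _intervals.append(intervals[i - _stopper])
--                 _stepper = 0
--             else:
--                 _intervals.append(0)
--                 _stepper += 1
--                 _stopper += 1
--         return tuple(_intervals)
--
--     return intervals
--
-- def accidentals(intervals: tuple[int], shifted_intervals: tuple[int]) -> tuple[int]:
--
--     # intaervalsを指定したスケール音程構成の要素数に合わせる
--     intervals = fix_intervals(intervals, shifted_intervals)
--
--     # 差分
--     diff = list(starmap(lambda x, y: y - x, zip(intervals, shifted_intervals)))
--
--     # 臨時記号
--     accidentals = []
--     for i in range(len(intervals)):
--         cur, next = i % len(intervals), (i + 1) % len(intervals)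
--         accidentals.append(diff[cur])
--         diff[next] = diff[next] + diff[cur]
--         diff[cur] = 0
--
--     return tuple(accidentals[-1:] + accidentals[:-1])
-- ===== SOURCE B (Python) =====
-- def accidentals(intervals, shifted_intervals):
--     n = len(shifted_intervals)
--     if len(intervals) < n:
--         # prefix sums of shifted_intervals so each window sum is O(1)
--         prefix = [0]
--         for v in shifted_intervals:
--             prefix.append(prefix[-1] + v)
--         fixed = []
--         j = 0  # pointer into intervals
--         w = 0  # current window width - 1
--         for i in range(n):
--             if j >= len(intervals):
--                 fixed.append(0)
--                 w = 0
--                 j += 1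
--             elif prefix[min(i + w + 1, n)] - prefix[i] >= intervals[j]:
--                 fixed.append(intervals[j])
--                 w = 0
--                 j += 1
--             else:
--                 fixed.append(0)
--                 w += 1
--     else:
--         fixed = list(intervals)
--     # accidentals are the running prefix sums of the differences, rotated right by one
--     s = 0
--     body = []
--     for x, y in zip(fixed, shifted_intervals):
--         s += y - x
--         body.append(s)
--     return tuple(body[-1:] + body[:-1])
-- ===== Notes on version B (the rewrite author's own statement) =====
-- stated objective: faster
-- what changed: B replaces the O(n^2) inner slice-sum in fix_intervals by a precomputed prefix-sum array (with an explicit two-pointer walk), and replaces the modular-index diff-mutation loop by a single running prefix sum of the differences rotated right by one.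
import Mathlib
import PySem

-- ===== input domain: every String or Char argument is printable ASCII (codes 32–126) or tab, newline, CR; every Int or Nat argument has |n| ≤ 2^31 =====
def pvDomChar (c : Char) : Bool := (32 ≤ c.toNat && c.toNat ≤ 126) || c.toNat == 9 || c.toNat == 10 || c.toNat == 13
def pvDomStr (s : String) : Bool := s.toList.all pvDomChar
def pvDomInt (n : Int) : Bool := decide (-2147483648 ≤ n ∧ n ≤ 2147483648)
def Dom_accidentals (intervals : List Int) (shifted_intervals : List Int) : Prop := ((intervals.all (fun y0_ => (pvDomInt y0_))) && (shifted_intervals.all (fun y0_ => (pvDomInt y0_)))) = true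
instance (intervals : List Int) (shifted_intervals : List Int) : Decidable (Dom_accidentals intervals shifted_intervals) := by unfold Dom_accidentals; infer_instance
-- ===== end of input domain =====

-- B replaces the quadratic slice-summing in fix_intervals (hit when len(intervals) < len(shifted_intervals))
-- by prefix sums, and the modular diff-mutation loop by one running sum (objective: faster).

-- ===== PORT A =====
-- fix_intervals: loop over range(len(scale_intervals)) with state (_stopper, _stepper, _intervals).
-- _stopper ≤ i always holds in Python, so Nat subtraction i - stopper is exact;
-- intervals[i - _stopper] is guaranteed in range by the first branch, so getD is exact.
def fixIntervalsA (intervals : List Int) (scale_intervals : List Int) : List Int :=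
  if intervals.length < scale_intervals.length then
    (((List.range scale_intervals.length).foldl
      (fun (st : Nat × Nat × List Int) i =>
        let stopper := st.1
        let stepper := st.2.1
        let acc := st.2.2
        if intervals.length ≤ i - stopper then
          (stopper, 0, acc ++ [(0 : Int)])
        else if intervals.getD (i - stopper) 0 ≤
            (PySem.List.slice scale_intervals (some (i : Int)) (some ((i : Int) + (stepper : Int) + 1))).sum then
          (stopper, 0, acc ++ [intervals.getD (i - stopper) 0])
        else
          (stopper + 1, stepper + 1, acc ++ [(0 : Int)]))
      (0, 0, [])).2.2)
  else intervals

-- one iteration of the accidentals loop: state (diff, accidentals); diff indices are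
-- in range whenever len(intervals) ≤ len(shifted_intervals) (otherwise Python raises), so getD/set are exact.
def stepA (n : Nat) (st : List Int × List Int) (i : Nat) : List Int × List Int :=
  let cur := i % n
  let next := (i + 1) % n
  let acc := st.2 ++ [st.1.getD cur 0]
  let d1 := st.1.set next (st.1.getD next 0 + st.1.getD cur 0)
  (d1.set cur 0, acc)

def accidentals (intervals : List Int) (shifted_intervals : List Int) : List Int :=
  let fixed := fixIntervalsA intervals shifted_intervals
  let diff := (fixed.zip shifted_intervals).map (fun p => p.2 - p.1)
  let n := fixed.length
  let r := (List.range n).foldl (stepA n) (diff, [])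
  -- accidentals[-1:] + accidentals[:-1] on a list of length n
  r.2.drop (n - 1) ++ r.2.take (n - 1)

-- ===== PORT B =====
def fixIntervalsB (intervals : List Int) (shifted_intervals : List Int) : List Int :=
  let n := shifted_intervals.length
  if intervals.length < n then
    -- prefix.append(prefix[-1] + v)
    let P := shifted_intervals.foldl (fun p v => p ++ [PySem.List.pyGetD p (-1) 0 + v]) [0]
    (((List.range n).foldl
      (fun (st : Nat × Nat × List Int) i =>
        let j := st.1
        let w := st.2.1
        let acc := st.2.2
        if intervals.length ≤ j then
          (j + 1, 0, acc ++ [(0 : Int)])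
        else if intervals.getD j 0 ≤ P.getD (min (i + w + 1) n) 0 - P.getD i 0 then
          (j + 1, 0, acc ++ [intervals.getD j 0])
        else
          (j, w + 1, acc ++ [(0 : Int)]))
      (0, 0, [])).2.2)
  else intervals

def accidentals_alt (intervals : List Int) (shifted_intervals : List Int) : List Int :=
  let fixed := fixIntervalsB intervals shifted_intervals
  -- s += y - x; body.append(s)
  let r := (fixed.zip shifted_intervals).foldl
    (fun (st : Int × List Int) p => (st.1 + (p.2 - p.1), st.2 ++ [st.1 + (p.2 - p.1)])) (0, [])
  let body := r.2
  let m := body.length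
  body.drop (m - 1) ++ body.take (m - 1)

-- ===== PRECONDITION & SPEC =====
-- A raises IndexError (diff[i]) on every input with len(intervals) > len(shifted_intervals); Pre_ excludes exactly those.
def Pre_accidentals (intervals : List Int) (shifted_intervals : List Int) : Prop :=
  intervals.length ≤ shifted_intervals.length
instance (intervals : List Int) (shifted_intervals : List Int) : Decidable (Pre_accidentals intervals shifted_intervals) := by unfold Pre_accidentals; infer_instance

def pvWitness_accidentals : List Int × List Int := ([1, 2], [1, 2, 3])

def Spec_accidentals (intervals : List Int) (shifted_intervals : List Int) (out : List Int) : Prop := out = accidentals_alt intervals shifted_intervals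
instance (intervals : List Int) (shifted_intervals : List Int) (out : List Int) : Decidable (Spec_accidentals intervals shifted_intervals out) := by unfold Spec_accidentals; infer_instance

-- ===== CLAIM (what is proved, stated in full; the proofs are below) =====
def Claim_equal_accidentals : Prop := ∀ (intervals : List Int) (shifted_intervals : List Int), Dom_accidentals intervals shifted_intervals → Pre_accidentals intervals shifted_intervals → Spec_accidentals intervals shifted_intervals (accidentals intervals shifted_intervals)

-- ===== LEMMAS AND PROOFS =====

-- running prefix sums: pref xs s = [s + x0, s + x0 + x1, ...]
def pref : List Int → Int → List Int
  | [], _ => []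
  | x :: xs, s => (s + x) :: pref xs (s + x)

theorem pref_length (xs : List Int) (s : Int) : (pref xs s).length = xs.length := by
  induction xs generalizing s with
  | nil => rfl
  | cons x xs ih => simp [pref, ih]

theorem pref_append_singleton (xs : List Int) (x : Int) (s : Int) :
    pref (xs ++ [x]) s = pref xs s ++ [s + xs.sum + x] := by
  induction xs generalizing s with
  | nil => simp [pref]
  | cons y ys ih => simp [pref, ih]; ring_nf

theorem pref_getD (xs : List Int) (s : Int) (j : Nat) (hj : j < xs.length) :
    (pref xs s).getD j 0 = s + (xs.take (j + 1)).sum := by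
  induction xs generalizing s j with
  | nil => simp at hj
  | cons x xs ih =>
    cases j with
    | zero => simp [pref]
    | succ j =>
      simp only [pref, List.getD_cons_succ, List.take_succ_cons, List.sum_cons]
      rw [ih _ j (by simpa using hj)]
      ring

theorem prefix_fold_spec (xs : List Int) (acc : List Int) (s : Int) :
    xs.foldl (fun p v => p ++ [PySem.List.pyGetD p (-1) 0 + v]) (acc ++ [s])
      = acc ++ s :: pref xs s := by
  induction xs generalizing acc s with
  | nil => simp [pref]
  | cons x xs ih =>
    simp only [List.foldl_cons, PySem.List.pyGetD_neg_one_append_singleton]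
    rw [show acc ++ [s] ++ [s + x] = (acc ++ [s]) ++ [s + x] from by simp,
        ih (acc ++ [s]) (s + x)]
    simp [pref]

-- B's prefix table P = 0 :: pref shifted 0, and its entries are take-sums
theorem P_getD (xs : List Int) (j : Nat) (hj : j ≤ xs.length) :
    (xs.foldl (fun p v => p ++ [PySem.List.pyGetD p (-1) 0 + v]) [0]).getD j 0
      = (xs.take j).sum := by
  have h := prefix_fold_spec xs [] 0
  simp only [List.nil_append] at h
  rw [h]
  cases j with
  | zero => simp
  | succ j =>
    simp only [List.getD_cons_succ]
    rw [pref_getD xs 0 j (by omega)]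
    simp

-- slice sum = difference of take-sums
theorem slice_sum_eq (xs : List Int) (i w : Nat) (_hi : i < xs.length) :
    (PySem.List.slice xs (some (i : Int)) (some ((i : Int) + (w : Int) + 1))).sum
      = (xs.take (min (i + w + 1) xs.length)).sum - (xs.take i).sum := by
  have hcast : ((i : Int) + (w : Int) + 1) = ((i : Int) + ((w + 1 : Nat) : Int)) := by push_cast; ring
  rw [hcast, PySem.List.slice_natCast_add]
  have htake : xs.take (min (i + w + 1) xs.length) = xs.take (i + (w + 1)) := by
    rcases Nat.lt_or_ge xs.length (i + w + 1) with h | h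
    case _ => rw [min_eq_right (by omega), List.take_of_length_le (le_refl _),
          List.take_of_length_le (by omega)]
    case _ => rw [min_eq_left h, Nat.add_assoc]
  have hsplit : (xs.take (i + (w + 1))).sum = (xs.take i).sum + ((xs.drop i).take (w + 1)).sum := by
    rw [List.take_add, List.sum_append]
  rw [htake, hsplit]
  ring

-- coupled loops of fix_intervals: A's (stopper, stepper) state vs B's (j, w) pointer state
theorem fix_loop_rel (intervals scale : List Int) (m k stopper stepper : Nat) (acc : List Int)
    (hst : stopper ≤ k) (hm : k + m ≤ scale.length) :
    ((List.range' k m).foldl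
      (fun (st : Nat × Nat × List Int) i =>
        let stopper := st.1
        let stepper := st.2.1
        let acc := st.2.2
        if intervals.length ≤ i - stopper then
          (stopper, 0, acc ++ [(0 : Int)])
        else if intervals.getD (i - stopper) 0 ≤
            (PySem.List.slice scale (some (i : Int)) (some ((i : Int) + (stepper : Int) + 1))).sum then
          (stopper, 0, acc ++ [intervals.getD (i - stopper) 0])
        else
          (stopper + 1, stepper + 1, acc ++ [(0 : Int)]))
      (stopper, stepper, acc)).2.2
    = ((List.range' k m).foldl
      (fun (st : Nat × Nat × List Int) i =>
        let j := st.1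
        let w := st.2.1
        let acc := st.2.2
        if intervals.length ≤ j then
          (j + 1, 0, acc ++ [(0 : Int)])
        else if intervals.getD j 0 ≤
            (scale.foldl (fun p v => p ++ [PySem.List.pyGetD p (-1) 0 + v]) [0]).getD (min (i + w + 1) scale.length) 0
            - (scale.foldl (fun p v => p ++ [PySem.List.pyGetD p (-1) 0 + v]) [0]).getD i 0 then
          (j + 1, 0, acc ++ [intervals.getD j 0])
        else
          (j, w + 1, acc ++ [(0 : Int)]))
      (k - stopper, stepper, acc)).2.2 := by
  induction m generalizing k stopper stepper acc with
  | zero => rfl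
  | succ m ih =>
    rw [List.range'_succ, List.foldl_cons, List.foldl_cons]
    have hk : k < scale.length := by omega
    have hsum : (PySem.List.slice scale (some (k : Int)) (some ((k : Int) + (stepper : Int) + 1))).sum
        = (scale.foldl (fun p v => p ++ [PySem.List.pyGetD p (-1) 0 + v]) [0]).getD (min (k + stepper + 1) scale.length) 0
          - (scale.foldl (fun p v => p ++ [PySem.List.pyGetD p (-1) 0 + v]) [0]).getD k 0 := by
      rw [P_getD scale _ (by omega), P_getD scale _ (by omega), slice_sum_eq scale k stepper hk]
    simp only
    split
    · next h1 =>
      have h := ih (k + 1) stopper 0 (acc ++ [(0 : Int)]) (by omega) (by omega)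
      rw [show k + 1 - stopper = k - stopper + 1 by omega] at h
      exact h
    · next h1 =>
      rw [← hsum]
      split
      · next h2 =>
        have h := ih (k + 1) stopper 0 (acc ++ [intervals.getD (k - stopper) 0]) (by omega) (by omega)
        rw [show k + 1 - stopper = k - stopper + 1 by omega] at h
        exact h
      · next h2 =>
        have h := ih (k + 1) (stopper + 1) (stepper + 1) (acc ++ [(0 : Int)]) (by omega) (by omega)
        rw [show k + 1 - (stopper + 1) = k - stopper by omega] at h
        exact h

theorem fix_eq (intervals scale : List Int) :
    fixIntervalsA intervals scale = fixIntervalsB intervals scale := by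
  show _ = if intervals.length < scale.length then _ else intervals
  unfold fixIntervalsA
  split
  · rw [List.range_eq_range']
    exact fix_loop_rel intervals scale scale.length 0 0 0 [] (le_refl _) (by omega)
  · rfl

-- length of the fix loop's accumulator
theorem fix_loop_length (intervals scale : List Int) (m k stopper stepper : Nat) (acc : List Int) :
    (((List.range' k m).foldl
      (fun (st : Nat × Nat × List Int) i =>
        let stopper := st.1
        let stepper := st.2.1
        let acc := st.2.2
        if intervals.length ≤ i - stopper then
          (stopper, 0, acc ++ [(0 : Int)])
        else if intervals.getD (i - stopper) 0 ≤
            (PySem.List.slice scale (some (i : Int)) (some ((i : Int) + (stepper : Int) + 1))).sum then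
          (stopper, 0, acc ++ [intervals.getD (i - stopper) 0])
        else
          (stopper + 1, stepper + 1, acc ++ [(0 : Int)]))
      (stopper, stepper, acc)).2.2).length = acc.length + m := by
  induction m generalizing k stopper stepper acc with
  | zero => rfl
  | succ m ih =>
    rw [List.range'_succ, List.foldl_cons]
    simp only
    split
    · rw [ih]; simp; omega
    · split
      · rw [ih]; simp; omega
      · rw [ih]; simp; omega

theorem fixA_length (intervals scale : List Int) (h : intervals.length ≤ scale.length) :
    (fixIntervalsA intervals scale).length = scale.length := by
  unfold fixIntervalsA
  split
  · rw [List.range_eq_range', fix_loop_length]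
    simp
  · next h2 => omega

-- A's accidentals loop: invariant after k iterations (k < n)
theorem stepA_inv (d : List Int) (k : Nat) (hk : k < d.length) :
    (List.range' 0 k).foldl (stepA d.length) (d, [])
      = (List.replicate k 0 ++ (d.take (k + 1)).sum :: d.drop (k + 1), pref (d.take k) 0) := by
  induction k with
  | zero =>
    cases d with
    | nil => simp at hk
    | cons x t => simp [pref]
  | succ k ih =>
    rw [List.range'_1_concat, List.foldl_append, ih (by omega), List.foldl_cons, List.foldl_nil]
    have hk' : k < d.length := by omega
    have hlen : (List.replicate k (0 : Int) ++ (d.take (k + 1)).sum :: d.drop (k + 1)).length = d.length := by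
      simp; omega
    unfold stepA
    have hcur : k % d.length = k := Nat.mod_eq_of_lt hk'
    have hnext : (k + 1) % d.length = k + 1 := Nat.mod_eq_of_lt hk
    simp only [Nat.zero_add, hcur, hnext]
    have hgetk : (List.replicate k (0 : Int) ++ (d.take (k + 1)).sum :: d.drop (k + 1)).getD k 0
        = (d.take (k + 1)).sum := by
      rw [List.getD_eq_getElem?_getD, List.getElem?_append_right (by simp)]
      simp
    have hdrop : d.drop (k + 1) = d[k + 1] :: d.drop (k + 2) :=
      List.drop_eq_getElem_cons hk
    have hgetk1 : (List.replicate k (0 : Int) ++ (d.take (k + 1)).sum :: d.drop (k + 1)).getD (k + 1) 0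
        = d[k + 1] := by
      rw [List.getD_eq_getElem?_getD, List.getElem?_append_right (by simp)]
      simp only [List.length_replicate, Nat.add_sub_cancel_left, List.getElem?_cons_succ]
      rw [hdrop]
      simp [List.getElem?_eq_getElem hk]
    have hset1 : (List.replicate k (0 : Int) ++ (d.take (k + 1)).sum :: d.drop (k + 1)).set (k + 1)
          (d[k + 1] + (d.take (k + 1)).sum)
        = List.replicate k 0 ++ (d.take (k + 1)).sum :: (d[k + 1] + (d.take (k + 1)).sum) :: d.drop (k + 2) := by
      rw [List.set_append_right _ _ (by simp), List.length_replicate]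
      congr 1
      rw [show k + 1 - k = 1 by omega, List.set_cons_succ, hdrop, List.set_cons_zero]
    have hset2 : (List.replicate k (0 : Int) ++ (d.take (k + 1)).sum :: (d[k + 1] + (d.take (k + 1)).sum) :: d.drop (k + 2)).set k 0
        = List.replicate (k + 1) 0 ++ (d[k + 1] + (d.take (k + 1)).sum) :: d.drop (k + 2) := by
      rw [List.set_append_right _ _ (by simp), List.replicate_succ' (n := k)]
      simp
    rw [hgetk, hgetk1, hset1, hset2]
    have hsum : d[k + 1] + (d.take (k + 1)).sum = (d.take (k + 2)).sum := by
      rw [List.sum_take_succ d (k + 1) hk]; ring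
    have hpref : pref (d.take k) 0 ++ [(d.take (k + 1)).sum] = pref (d.take (k + 1)) 0 := by
      conv_rhs => rw [List.take_add_one, List.getElem?_eq_getElem hk']
      simp only [Option.toList_some]
      rw [pref_append_singleton, List.sum_take_succ d k hk']
      simp
    rw [hsum, hpref]

theorem stepA_acc (d : List Int) :
    ((List.range d.length).foldl (stepA d.length) (d, [])).2 = pref d 0 := by
  cases hn : d.length with
  | zero =>
    rw [List.length_eq_zero_iff] at hn
    subst hn
    simp [pref]
  | succ n =>
    have hnlt : n < d.length := by omega
    rw [show stepA (n + 1) = stepA d.length by rw [hn],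
        List.range_eq_range', List.range'_1_concat, List.foldl_append, stepA_inv d n hnlt, List.foldl_cons, List.foldl_nil]
    unfold stepA
    simp only [Nat.zero_add]
    have h1 : n % d.length = n := Nat.mod_eq_of_lt hnlt
    have hget : (List.replicate n (0 : Int) ++ (d.take (n + 1)).sum :: d.drop (n + 1)).getD n 0
        = (d.take (n + 1)).sum := by
      rw [List.getD_eq_getElem?_getD, List.getElem?_append_right (by simp)]
      simp
    have htk : d.take (n + 1) = d := by
      rw [← hn]; exact List.take_of_length_le (le_refl _)
    simp only [h1, hget]
    rw [htk]
    have hdr : d.drop n = [d[n]] := by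
      rw [List.drop_eq_getElem_cons hnlt]
      simp [show n + 1 = d.length from hn.symm]
    have hfin : pref (d.take n) 0 ++ [d.sum] = pref d 0 := by
      conv_rhs => rw [show d = d.take n ++ d.drop n from (List.take_append_drop _ d).symm]
      rw [hdr, pref_append_singleton]
      have hs := List.sum_take_succ d n hnlt
      rw [htk] at hs
      simp [hs]
    rw [hfin]

-- B's running-sum loop produces pref of the mapped list
theorem foldB_body (xs : List (Int × Int)) (s : Int) (acc : List Int) :
    (xs.foldl (fun (st : Int × List Int) p => (st.1 + (p.2 - p.1), st.2 ++ [st.1 + (p.2 - p.1)])) (s, acc)).2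
      = acc ++ pref (xs.map (fun p => p.2 - p.1)) s := by
  induction xs generalizing s acc with
  | nil => simp [pref]
  | cons p xs ih =>
    simp only [List.foldl_cons, List.map_cons, pref]
    rw [ih]
    simp

-- ===== VERDICT (by name: the statement is the Claim_ definition above) =====
theorem accidentals_spec : Claim_equal_accidentals := by
  intro intervals shifted _hdom hpre
  unfold Spec_accidentals accidentals accidentals_alt
  rw [← fix_eq]
  have hfixlen : (fixIntervalsA intervals shifted).length = shifted.length := by
    by_cases h : intervals.length < shifted.length
    · exact fixA_length intervals shifted (le_of_lt h)
    · have heq : intervals.length = shifted.length := by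
        unfold Pre_accidentals at hpre; omega
      unfold fixIntervalsA
      rw [if_neg h]
      exact heq
  set fixed := fixIntervalsA intervals shifted with hfixed
  have hzlen : (fixed.zip shifted).length = fixed.length := by
    rw [List.length_zip, hfixlen]; omega
  have hdlen : ((fixed.zip shifted).map (fun p => p.2 - p.1)).length = fixed.length := by
    rw [List.length_map, hzlen]
  simp only
  rw [foldB_body]
  set d := (fixed.zip shifted).map (fun p => p.2 - p.1) with hd
  have := stepA_acc d
  rw [hdlen] at this
  rw [this]
  rw [List.nil_append, pref_length, hdlen]
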